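-- pv_equiv track=rewrite | github.com/AleeArdelian/LFTC | Lab_1/Scanner.py | GetStringFromToken
-- ===== SOURCE A (Python) =====
-- def GetStringFromToken(line, index):
--     token = ''
--     quote_count = 0
--     while index < len(line) and quote_count < 2:
--         if line[index] == '"':
--             quote_count += 1
--         token += line[index]
--         index += 1
--     return token, index
-- ===== SOURCE B (Python) =====
-- def GetStringFromToken(line, index):
--     if index >= len(line):
--         return '', index
--     q1 = line.find('"', index)
--     if q1 == -1:
--         return line[index:], len(line)
--     q2 = line.find('"', q1 + 1)
--     if q2 == -1:
--         return line[index:], len(line)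
--     return line[index:q2 + 1], q2 + 1
-- ===== Notes on version B (the rewrite author's own statement) =====
-- stated objective: simpler
-- what changed: Replaces the char-by-char while-loop that accumulates a token string under a quote counter with two str.find calls locating the quote positions and a single slice (C-level search/slice instead of a per-character interpreter loop with repeated string concatenation).
-- intended difference: For -len(line) <= index < 0 A's line[index] wraps to the end of the string and the loop then runs on past index 0 into the start, returning duplicated characters (on line 'x' with index -1 A returns 'xx' and index 1), while B uses Python's standard negative-start clamping for find/slicing and reads each character once (there B returns 'x' and index 1), which is the intended token at that position. — e.g. on GetStringFromToken("x", -1): A returns ("xx", 1), B returns ("x", 1)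
import Mathlib
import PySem

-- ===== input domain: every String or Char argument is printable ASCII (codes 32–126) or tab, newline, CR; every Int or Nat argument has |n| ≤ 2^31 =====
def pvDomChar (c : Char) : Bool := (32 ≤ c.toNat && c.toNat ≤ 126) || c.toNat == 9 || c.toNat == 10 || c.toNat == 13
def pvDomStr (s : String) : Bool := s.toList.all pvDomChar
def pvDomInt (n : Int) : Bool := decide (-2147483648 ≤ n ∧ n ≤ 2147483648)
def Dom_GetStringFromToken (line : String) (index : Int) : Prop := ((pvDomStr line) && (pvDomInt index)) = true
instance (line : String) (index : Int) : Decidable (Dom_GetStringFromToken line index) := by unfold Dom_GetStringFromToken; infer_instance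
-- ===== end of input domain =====

set_option maxRecDepth 8192

-- B replaces A's char-by-char accumulation loop with its quote counter by two delimiter
-- searches (str.find) plus one slice (objective: simpler); A = B is proved for 0 ≤ index,
-- A's negative-index wraparound is documented as the intended difference D_.

-- ===== PORT A =====
-- while index < len(line) and quote_count < 2: …
def pvAloop (cs : List Char) (token : List Char) (qc : Int) (index : Int) : List Char × Int :=
  if _h : index < (cs.length : Int) ∧ qc < 2 then
    match PySem.List.pyGet? cs index with
    | none => (token, index)   -- Python raises IndexError here; excluded by Pre_
    | some c => pvAloop cs (token ++ [c]) (if c = '"' then qc + 1 else qc) (index + 1)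
  else (token, index)
termination_by ((cs.length : Int) - index).toNat
decreasing_by omega

def GetStringFromToken (line : String) (index : Int) : String × Int :=
  let r := pvAloop line.toList [] 0 index
  (String.ofList r.1, r.2)

-- ===== PORT B =====
def GetStringFromToken_alt (line : String) (index : Int) : String × Int :=
  let cs := line.toList
  if (cs.length : Int) ≤ index then ("", index)
  else
    let q1 := PySem.Chars.findFrom cs ['"'] index none
    if q1 = -1 then (String.ofList (PySem.List.slice cs (some index) none), (cs.length : Int))
    else
      let q2 := PySem.Chars.findFrom cs ['"'] (q1 + 1) none
      if q2 = -1 then (String.ofList (PySem.List.slice cs (some index) none), (cs.length : Int))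
      else (String.ofList (PySem.List.slice cs (some index) (some (q2 + 1))), q2 + 1)

-- ===== PRECONDITION & SPEC =====
-- Pre_ excludes exactly index < -len(line), where A's first line[index] raises IndexError.
def Pre_GetStringFromToken (line : String) (index : Int) : Prop :=
  -(line.toList.length : Int) ≤ index
instance (line : String) (index : Int) : Decidable (Pre_GetStringFromToken line index) := by
  unfold Pre_GetStringFromToken; infer_instance
def pvWitness_GetStringFromToken : String × Int := ("a\"b\"c", 0)

-- On -len(line) ≤ index < 0 A's line[index] wraps to the end of the string and the loop then
-- runs on across index 0 into the start, returning duplicated characters; B applies Python's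
-- usual negative-start clamping of find/slicing and reads each character once, which is the
-- intended "token starting at this position".
def D_GetStringFromToken (line : String) (index : Int) : Prop := index < 0
instance (line : String) (index : Int) : Decidable (D_GetStringFromToken line index) := by
  unfold D_GetStringFromToken; infer_instance

def Spec_GetStringFromToken (line : String) (index : Int) (out : String × Int) : Prop :=
  ¬ D_GetStringFromToken line index → out = GetStringFromToken_alt line index
instance (line : String) (index : Int) (out : String × Int) : Decidable (Spec_GetStringFromToken line index out) := by
  unfold Spec_GetStringFromToken; infer_instance

def pvDiffWitness_GetStringFromToken : String × Int := ("x", -1)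
def pvDiffWitnessOut_GetStringFromToken : (String × Int) × (String × Int) := (("xx", 1), ("x", 1))

-- ===== CLAIM (what is proved, stated in full; the proofs are below) =====
def Claim_unchanged_GetStringFromToken : Prop := ∀ (line : String) (index : Int), Dom_GetStringFromToken line index → Pre_GetStringFromToken line index → Spec_GetStringFromToken line index (GetStringFromToken line index)
def Claim_changed_GetStringFromToken : Prop := Dom_GetStringFromToken (pvDiffWitness_GetStringFromToken.1) (pvDiffWitness_GetStringFromToken.2) ∧ Pre_GetStringFromToken (pvDiffWitness_GetStringFromToken.1) (pvDiffWitness_GetStringFromToken.2) ∧ D_GetStringFromToken (pvDiffWitness_GetStringFromToken.1) (pvDiffWitness_GetStringFromToken.2) ∧ GetStringFromToken (pvDiffWitness_GetStringFromToken.1) (pvDiffWitness_GetStringFromToken.2) = pvDiffWitnessOut_GetStringFromToken.1 ∧ GetStringFromToken_alt (pvDiffWitness_GetStringFromToken.1) (pvDiffWitness_GetStringFromToken.2) = pvDiffWitnessOut_GetStringFromToken.2 ∧ pvDiffWitnessOut_GetStringFromToken.1 ≠ pvDiffWitnessOut_GetStringFromToken.2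
def Claim_exact_GetStringFromToken : Prop := ∀ (line : String) (index : Int), Dom_GetStringFromToken line index → Pre_GetStringFromToken line index → D_GetStringFromToken line index → GetStringFromToken line index ≠ GetStringFromToken_alt line index

-- ===== LEMMAS AND PROOFS =====

theorem singleton_prefix_head? (a : Char) (l : List Char) : [a] <+: l ↔ l.head? = some a := by
  cases l <;> simp [List.prefix_cons_iff, eq_comm]

-- find on a single-character needle is findIdx? of that character
theorem find_quote (s : List Char) :
    PySem.Chars.find s ['"'] =
      match s.findIdx? (fun c => c == '"') with
      | none => -1
      | some j => (j : Int) := by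
  cases h : s.findIdx? (fun c => c == '"') with
  | none =>
      simp only []
      rw [PySem.Chars.find_eq_neg_one_iff, List.singleton_infix_iff]
      intro hm
      have := List.findIdx?_eq_none_iff.mp h _ hm
      simp at this
  | some j =>
      simp only []
      obtain ⟨hj, hpj, hmin⟩ := List.findIdx?_eq_some_iff_getElem.mp h
      have hmem : ('"' : Char) ∈ s := by
        have : s[j] = '"' := by simpa using hpj
        exact this ▸ s.getElem_mem hj
      have hnn : 0 ≤ PySem.Chars.find s ['"'] := by
        rw [PySem.Chars.find_nonneg_iff, List.singleton_infix_iff]; exact hmem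
      obtain ⟨hpre, hminf⟩ := PySem.Chars.find_spec hnn
      set f := (PySem.Chars.find s ['"']).toNat with hf
      have hflen : f < s.length := by
        have h1 := (singleton_prefix_head? _ _).mp hpre
        have := List.head?_drop (l := s) (i := f)
        rw [this] at h1
        exact (List.getElem?_eq_some_iff.mp h1).1
      have hjf : j = f := by
        rcases lt_trichotomy j f with hlt | he | hgt
        · exfalso; apply hminf j hlt
          rw [singleton_prefix_head?, List.head?_drop]
          simp [hj]
          simpa using hpj
        · exact he
        · exfalso
          have h1 := (singleton_prefix_head? _ _).mp hpre
          rw [List.head?_drop] at h1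
          have hsf : s[f] = '"' := (List.getElem?_eq_some_iff.mp h1).2
          have hb := hmin f hgt
          rw [hsf] at hb
          simp at hb
      omega

-- findFrom with an in-range natural start, via findIdx? of the dropped suffix
theorem findFrom_quote (cs : List Char) (i : Nat) (hi : i ≤ cs.length) :
    PySem.Chars.findFrom cs ['"'] (i : Int) none =
      match (cs.drop i).findIdx? (fun c => c == '"') with
      | none => -1
      | some j => ((i + j : Nat) : Int) := by
  rw [PySem.Chars.findFrom_natCast cs ['"'] i hi, find_quote]
  cases h : (cs.drop i).findIdx? (fun c => c == '"') <;> simp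

theorem findIdx?_some_lt {l : List Char} {p : Char → Bool} {j : Nat} (h : l.findIdx? p = some j) : j < l.length :=
  (List.findIdx?_eq_some_iff_getElem.mp h).1

-- A's loop after the first quote has been consumed
theorem pvAloop_one (cs : List Char) : ∀ (n i : Nat) (token : List Char), i ≤ cs.length → cs.length - i = n →
    pvAloop cs token 1 (i : Int) =
      match (cs.drop i).findIdx? (fun c => c == '"') with
      | none => (token ++ cs.drop i, (cs.length : Int))
      | some j => (token ++ (cs.drop i).take (j+1), ((i + j + 1 : Nat) : Int)) := by
  intro n
  induction n with
  | zero =>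
      intro i token hi hn
      have hie : i = cs.length := by omega
      rw [pvAloop]
      simp [hie]
  | succ m ih =>
      intro i token hi hn
      have hlt : i < cs.length := by omega
      have hdrop : cs.drop i = cs[i] :: cs.drop (i+1) := (List.getElem_cons_drop hlt).symm
      rw [pvAloop]
      rw [dif_pos ⟨by exact_mod_cast hlt, by norm_num⟩]
      rw [PySem.List.pyGet?_natCast, List.getElem?_eq_getElem hlt]
      simp only []
      by_cases hq : cs[i] = '"'
      · rw [if_pos hq, pvAloop]
        rw [dif_neg (by omega)]
        rw [hdrop, List.findIdx?_cons]
        simp [hq]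
      · rw [if_neg hq]
        have hqb : (cs[i] == '"') = false := by simp [hq]
        have hih := ih (i+1) (token ++ [cs[i]]) (by omega) (by omega)
        push_cast at hih ⊢
        rw [hih, hdrop, List.findIdx?_cons, hqb]
        rw [if_neg (by simp)]
        cases h2 : (cs.drop (i+1)).findIdx? (fun c => c == '"') with
        | none => simp
        | some j' =>
            simp only [Option.map_some, Prod.mk.injEq, List.take_succ_cons]
            constructor
            · simp
            · push_cast; ring

-- A's loop before any quote has been seen
theorem pvAloop_zero (cs : List Char) : ∀ (n i : Nat) (token : List Char), i ≤ cs.length → cs.length - i = n →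
    pvAloop cs token 0 (i : Int) =
      match (cs.drop i).findIdx? (fun c => c == '"') with
      | none => (token ++ cs.drop i, (cs.length : Int))
      | some j => pvAloop cs (token ++ (cs.drop i).take (j+1)) 1 ((i + j + 1 : Nat) : Int) := by
  intro n
  induction n with
  | zero =>
      intro i token hi hn
      have hie : i = cs.length := by omega
      rw [pvAloop]
      simp [hie]
  | succ m ih =>
      intro i token hi hn
      have hlt : i < cs.length := by omega
      have hdrop : cs.drop i = cs[i] :: cs.drop (i+1) := (List.getElem_cons_drop hlt).symm
      rw [pvAloop]
      rw [dif_pos ⟨by exact_mod_cast hlt, by norm_num⟩]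
      rw [PySem.List.pyGet?_natCast, List.getElem?_eq_getElem hlt]
      simp only []
      by_cases hq : cs[i] = '"'
      · rw [if_pos hq, hdrop, List.findIdx?_cons]
        have hqb : (cs[i] == '"') = true := by simp [hq]
        rw [hqb]
        simp only [List.take_succ_cons]
        push_cast
        norm_num
      · rw [if_neg hq]
        have hqb : (cs[i] == '"') = false := by simp [hq]
        have hih := ih (i+1) (token ++ [cs[i]]) (by omega) (by omega)
        push_cast at hih ⊢
        rw [hih, hdrop, List.findIdx?_cons, hqb]
        rw [if_neg (by simp)]
        cases h2 : (cs.drop (i+1)).findIdx? (fun c => c == '"') with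
        | none => simp
        | some j' =>
            simp only [Option.map_some, List.take_succ_cons]
            have harg : ((i:Int) + 1 + (j':Int) + 1) = ((i:Int) + ((j':Int) + 1) + 1) := by ring
            rw [harg]
            simp

-- wrappers: the loop characterizations with the findIdx? case supplied as a hypothesis
theorem findFrom_quote_none {cs : List Char} {i : Nat} (hi : i ≤ cs.length)
    (h : (cs.drop i).findIdx? (fun c => c == '"') = none) :
    PySem.Chars.findFrom cs ['"'] (i : Int) none = -1 := by
  rw [findFrom_quote cs i hi, h]

theorem findFrom_quote_some {cs : List Char} {i j : Nat} (hi : i ≤ cs.length)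
    (h : (cs.drop i).findIdx? (fun c => c == '"') = some j) :
    PySem.Chars.findFrom cs ['"'] (i : Int) none = ((i + j : Nat) : Int) := by
  rw [findFrom_quote cs i hi, h]

theorem pvAloop_zero_none {cs : List Char} {i : Nat} (token : List Char) (hi : i ≤ cs.length)
    (h : (cs.drop i).findIdx? (fun c => c == '"') = none) :
    pvAloop cs token 0 (i : Int) = (token ++ cs.drop i, (cs.length : Int)) := by
  rw [pvAloop_zero cs (cs.length - i) i token hi rfl, h]

theorem pvAloop_zero_some {cs : List Char} {i j : Nat} (token : List Char) (hi : i ≤ cs.length)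
    (h : (cs.drop i).findIdx? (fun c => c == '"') = some j) :
    pvAloop cs token 0 (i : Int) = pvAloop cs (token ++ (cs.drop i).take (j+1)) 1 ((i + j + 1 : Nat) : Int) := by
  rw [pvAloop_zero cs (cs.length - i) i token hi rfl, h]

theorem pvAloop_one_none {cs : List Char} {i : Nat} (token : List Char) (hi : i ≤ cs.length)
    (h : (cs.drop i).findIdx? (fun c => c == '"') = none) :
    pvAloop cs token 1 (i : Int) = (token ++ cs.drop i, (cs.length : Int)) := by
  rw [pvAloop_one cs (cs.length - i) i token hi rfl, h]

theorem pvAloop_one_some {cs : List Char} {i j : Nat} (token : List Char) (hi : i ≤ cs.length)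
    (h : (cs.drop i).findIdx? (fun c => c == '"') = some j) :
    pvAloop cs token 1 (i : Int) = (token ++ (cs.drop i).take (j+1), ((i + j + 1 : Nat) : Int)) := by
  rw [pvAloop_one cs (cs.length - i) i token hi rfl, h]

theorem pvMain (line : String) (index : Int) (h0 : 0 ≤ index) :
    GetStringFromToken line index = GetStringFromToken_alt line index := by
  obtain ⟨i, rfl⟩ : ∃ i : Nat, index = (i : Int) := ⟨index.toNat, by omega⟩
  simp only [GetStringFromToken, GetStringFromToken_alt]
  set cs := line.toList with hcs
  by_cases hlen : cs.length ≤ i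
  · rw [pvAloop, dif_neg (by push_cast; omega)]
    rw [if_pos (by exact_mod_cast hlen)]
  · rw [if_neg (by omega)]
    cases h1 : (cs.drop i).findIdx? (fun c => c == '"') with
    | none =>
        rw [pvAloop_zero_none [] (by omega) h1, findFrom_quote_none (by omega) h1]
        simp [PySem.List.slice_from_natCast]
    | some j =>
        have hjlt : i + j + 1 ≤ cs.length := by
          have h' := findIdx?_some_lt h1
          rw [List.length_drop] at h'
          omega
        rw [pvAloop_zero_some [] (by omega) h1, findFrom_quote_some (by omega) h1]
        rw [if_neg (by push_cast; omega)]
        have hc1 : ((i + j : Nat) : Int) + 1 = ((i + j + 1 : Nat) : Int) := by push_cast; ring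
        rw [hc1]
        cases h2 : (cs.drop (i+j+1)).findIdx? (fun c => c == '"') with
        | none =>
            rw [pvAloop_one_none _ (by omega) h2, findFrom_quote_none (by omega) h2]
            rw [if_pos rfl]
            simp only [List.nil_append, Prod.mk.injEq, PySem.List.slice_from_natCast]
            refine ⟨?_, by simp⟩
            congr 1
            rw [show cs.drop (i+j+1) = (cs.drop i).drop (j+1) by rw [List.drop_drop]; ring_nf]
            rw [List.take_append_drop]
        | some j2 =>
            rw [pvAloop_one_some _ (by omega) h2, findFrom_quote_some (by omega) h2]
            rw [if_neg (by push_cast; omega)]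
            have hc2 : ((i + j + 1 + j2 : Nat) : Int) + 1 = ((i + j + 1 + j2 + 1 : Nat) : Int) := by push_cast; ring
            rw [hc2, PySem.List.slice_natCast]
            simp only [List.nil_append, Prod.mk.injEq]
            refine ⟨?_, by simp⟩
            congr 1
            rw [show i + j + 1 + j2 + 1 - i = (j+1) + (j2+1) by omega]
            conv_rhs => rw [List.take_add]
            rw [show (cs.drop i).drop (j+1) = cs.drop (i+j+1) by rw [List.drop_drop]; ring_nf]


theorem findFrom_neg (cs sub : List Char) (a : Int) (h1 : -(cs.length:Int) ≤ a) (h2 : a < 0) :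
    PySem.Chars.findFrom cs sub a none = PySem.Chars.findFrom cs sub (a + cs.length) none := by
  have h3 : ¬(a + (cs.length:Int) < 0) := by omega
  have h5 : ¬((cs.length:Int) < a + cs.length) := by omega
  simp only [PySem.Chars.findFrom, if_pos h2, if_neg h3, if_neg h5]

theorem slice_neg_nat (xs : List Char) (a : Int) (b : Nat) (ha1 : -(xs.length:Int) ≤ a) (ha2 : a < 0) (hb : b ≤ xs.length) :
    PySem.List.slice xs (some a) (some (b:Int)) = ((xs.drop ((xs.length:Int) + a).toNat).take (b - ((xs.length:Int) + a).toNat)) := by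
  simp only [PySem.List.slice, PySem.List.clampIdx]
  rw [if_pos ha2, if_neg (by omega : ¬((xs.length:Int) + a < 0)), if_neg (by omega : ¬((b:Int) < 0))]
  congr 1
  omega

theorem pvAloop_len (cs : List Char) : ∀ (n : Nat) (token : List Char) (qc index : Int),
    (((cs.length):Int) - index).toNat = n →
    ((pvAloop cs token qc index).1.length : Int) - token.length = (pvAloop cs token qc index).2 - index := by
  intro n
  induction n with
  | zero =>
      intro token qc index hn
      rw [pvAloop, dif_neg (by omega)]
      simp
  | succ m ih =>
      intro token qc index hn
      rw [pvAloop]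
      by_cases hc : index < ((cs.length):Int) ∧ qc < 2
      · rw [dif_pos hc]
        cases hg : PySem.List.pyGet? cs index with
        | none => simp
        | some c =>
            simp only []
            have hih := ih (token ++ [c]) (if c = '"' then qc+1 else qc) (index+1) (by omega)
            simp only [List.length_append, List.length_cons, List.length_nil] at hih ⊢
            push_cast at hih ⊢
            omega
      · rw [dif_neg hc]
        simp

theorem pvBalt_len (line : String) (index : Int) (h1 : -((line.toList.length):Int) ≤ index) (h2 : index < 0) :
    (((GetStringFromToken_alt line index).1.toList.length) : Int)
      = (GetStringFromToken_alt line index).2 - line.toList.length - index := by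
  simp only [GetStringFromToken_alt]
  set cs := line.toList with hcs
  have hn1 : 1 ≤ cs.length := by omega
  rw [if_neg (by omega)]
  obtain ⟨s', hs'⟩ : ∃ s' : Nat, index + (cs.length:Int) = (s' : Int) := ⟨(index + cs.length).toNat, by omega⟩
  have hs'le : s' ≤ cs.length := by omega
  rw [findFrom_neg cs _ index h1 h2, hs']
  obtain ⟨k, hkeq, hkpos, hkle⟩ : ∃ k : Nat, index = -(k:Int) ∧ 0 < k ∧ k ≤ cs.length :=
    ⟨(-index).toNat, by omega, by omega, by omega⟩
  have hdropneg : PySem.List.slice cs (some index) none = cs.drop (cs.length - k) := by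
    rw [hkeq]
    exact PySem.List.slice_from_neg_natCast cs k hkpos
  cases hf1 : (cs.drop s').findIdx? (fun c => c == '"') with
  | none =>
      rw [findFrom_quote_none hs'le hf1, if_pos rfl]
      rw [hdropneg]
      simp only [String.toList_ofList, List.length_drop]
      omega
  | some j =>
      have hj : s' + j + 1 ≤ cs.length := by
        have h' := findIdx?_some_lt hf1
        rw [List.length_drop] at h'
        omega
      rw [findFrom_quote_some hs'le hf1]
      rw [if_neg (by push_cast; omega)]
      rw [show (((s' + j : Nat)) : Int) + 1 = ((s' + j + 1 : Nat) : Int) by push_cast; ring]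
      cases hf2 : (cs.drop (s'+j+1)).findIdx? (fun c => c == '"') with
      | none =>
          rw [findFrom_quote_none (by omega) hf2, if_pos rfl]
          rw [hdropneg]
          simp only [String.toList_ofList, List.length_drop]
          omega
      | some j2 =>
          have hj2 : s' + j + 1 + j2 + 1 ≤ cs.length := by
            have h' := findIdx?_some_lt hf2
            rw [List.length_drop] at h'
            omega
          rw [findFrom_quote_some (by omega) hf2]
          rw [if_neg (by push_cast; omega)]
          rw [show (((s' + j + 1 + j2 : Nat)) : Int) + 1 = ((s' + j + 1 + j2 + 1 : Nat) : Int) by push_cast; ring]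
          rw [slice_neg_nat cs index (s'+j+1+j2+1) h1 h2 hj2]
          simp only [String.toList_ofList, List.length_take, List.length_drop]
          push_cast
          omega

-- ===== VERDICT (by name: the statement is the Claim_ definition above) =====
theorem GetStringFromToken_spec : Claim_unchanged_GetStringFromToken := by
  intro line index _hdom _hpre hnd
  have h0 : 0 ≤ index := by
    unfold D_GetStringFromToken at hnd
    omega
  exact pvMain line index h0

theorem GetStringFromToken_changed : Claim_changed_GetStringFromToken := by
  unfold Claim_changed_GetStringFromToken
  refine ⟨by decide, by decide, by decide, ?_, by decide, by decide⟩
  show GetStringFromToken "x" (-1) = ("xx", 1)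
  simp [GetStringFromToken, show ("x" : String).toList = ['x'] from by decide,
    pvAloop, PySem.List.pyGet?, PySem.List.pyIdx?]

theorem GetStringFromToken_tight : Claim_exact_GetStringFromToken := by
  intro line index _hdom hpre hd heq
  unfold Pre_GetStringFromToken at hpre
  unfold D_GetStringFromToken at hd
  have hA := pvAloop_len line.toList (((line.toList.length:Int) - index).toNat) [] 0 index rfl
  have hB := pvBalt_len line index hpre hd
  have h1 : (GetStringFromToken line index).1 = (GetStringFromToken_alt line index).1 := by rw [heq]
  have h2 : (GetStringFromToken line index).2 = (GetStringFromToken_alt line index).2 := by rw [heq]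
  simp only [GetStringFromToken, List.length_nil] at hA h1 h2
  have h1' := congrArg String.toList h1
  rw [String.toList_ofList] at h1'
  have hlen := congrArg List.length h1'
  omega
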